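-- pv_equiv track=rewrite | github.com/fernan256/inteligencia_artificial | tp_7/multilayer_perceptron.py | historical_values
-- ===== SOURCE A (Python) =====
-- def historical_values(all_time_values, hidden_graph_values, number_elements):
--     m = 0
--     for n in range(len(all_time_values)):
--       if m == number_elements:
--         m = 0
--       hidden_graph_values[m].append(all_time_values[n])
--       m += 1
--
--     return hidden_graph_values
-- ===== SOURCE B (Python) =====
-- def historical_values(all_time_values, hidden_graph_values, number_elements):
--     # Per-bucket view: bucket j receives exactly the values whose position is
--     # congruent to j modulo number_elements, in order. (Mutates the buckets in
--     # place, like the original.)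
--     indexed = list(enumerate(all_time_values))
--     for j, bucket in enumerate(hidden_graph_values):
--         bucket.extend(v for n, v in indexed if n % number_elements == j)
--     return hidden_graph_values
-- ===== Notes on version B (the rewrite author's own statement) =====
-- stated objective: alternative
-- what changed: Inverts the traversal: instead of one pass over the values with a manually wrapped bucket counter, B iterates over the buckets and fills bucket j with the values whose position is congruent to j modulo number_elements.
-- outside the precondition, e.g. on historical_values([1, 2], [[], []], 0): A returns [[1], [2]], B raises ZeroDivisionError; on historical_values([1, 2], [[], []], -1): A returns [[1], [2]], B returns [[1, 2], []]
import Mathlib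
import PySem

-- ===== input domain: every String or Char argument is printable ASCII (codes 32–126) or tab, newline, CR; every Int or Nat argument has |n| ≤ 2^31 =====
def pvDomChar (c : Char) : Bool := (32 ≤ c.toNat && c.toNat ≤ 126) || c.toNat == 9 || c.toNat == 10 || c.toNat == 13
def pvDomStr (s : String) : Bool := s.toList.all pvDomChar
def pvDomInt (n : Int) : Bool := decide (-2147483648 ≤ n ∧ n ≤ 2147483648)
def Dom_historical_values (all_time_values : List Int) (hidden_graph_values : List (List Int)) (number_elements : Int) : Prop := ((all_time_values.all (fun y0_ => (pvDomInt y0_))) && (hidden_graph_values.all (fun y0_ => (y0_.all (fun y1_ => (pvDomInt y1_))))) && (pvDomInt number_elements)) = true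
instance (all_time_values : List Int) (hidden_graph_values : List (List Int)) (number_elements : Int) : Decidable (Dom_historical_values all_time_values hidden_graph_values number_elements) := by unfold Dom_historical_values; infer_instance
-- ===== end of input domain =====

-- B distributes per bucket (residue classes of positions) instead of A's single pass
-- with a wrapping counter; equal return values on Pre_; both mutate the buckets in place
-- in Python, the equivalence proved here is about the return value.

-- ===== PORT A =====
def historical_values (all_time_values : List Int) (hidden_graph_values : List (List Int)) (number_elements : Int) : List (List Int) :=
  -- m = 0; for n in range(len(all_time_values)): if m == number_elements: m = 0;
  --   hidden_graph_values[m].append(all_time_values[n]); m += 1   (m here is the reset value)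
  ((PySem.List.pyRange 0 all_time_values.length 1).foldl
    (fun (st : Int × List (List Int)) n =>
      ((if st.1 = number_elements then 0 else st.1) + 1,
       st.2.modify (if st.1 = number_elements then 0 else st.1).toNat
         (fun b => b ++ [PySem.List.pyGetD all_time_values n 0])))
    (0, hidden_graph_values)).2

-- ===== PORT B =====
def historical_values_alt (all_time_values : List Int) (hidden_graph_values : List (List Int)) (number_elements : Int) : List (List Int) :=
  -- indexed = list(enumerate(all_time_values))
  -- for j, bucket in enumerate(hidden_graph_values):
  --     bucket.extend(v for n, v in indexed if n % number_elements == j)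
  (PySem.List.enumerate hidden_graph_values 0).map
    (fun jb => jb.2 ++ (PySem.List.enumerate all_time_values 0).filterMap
      (fun nv => if PySem.Int.mod nv.1 number_elements == jb.1 then some nv.2 else none))

-- ===== PRECONDITION & SPEC =====
-- Pre_ excludes (a) inputs where A raises IndexError (more buckets demanded than exist),
-- and (b) nonpositive number_elements, outside the natural domain of a cyclic bucket count,
-- where A's no-reset leftover-counter fill is accidental and B raises or differs.
def Pre_historical_values (all_time_values : List Int) (hidden_graph_values : List (List Int)) (number_elements : Int) : Prop :=
  1 ≤ number_elements ∧ min number_elements (all_time_values.length : Int) ≤ (hidden_graph_values.length : Int)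
instance (all_time_values : List Int) (hidden_graph_values : List (List Int)) (number_elements : Int) : Decidable (Pre_historical_values all_time_values hidden_graph_values number_elements) := by unfold Pre_historical_values; infer_instance

def pvWitness_historical_values : List Int × List (List Int) × Int := ([3, 1, 4, 1, 5], [[0], [], []], 3)

def Spec_historical_values (all_time_values : List Int) (hidden_graph_values : List (List Int)) (number_elements : Int) (out : List (List Int)) : Prop := out = historical_values_alt all_time_values hidden_graph_values number_elements
instance (all_time_values : List Int) (hidden_graph_values : List (List Int)) (number_elements : Int) (out : List (List Int)) : Decidable (Spec_historical_values all_time_values hidden_graph_values number_elements out) := by unfold Spec_historical_values; infer_instance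

-- ===== CLAIM (what is proved, stated in full; the proofs are below) =====
def Claim_equal_historical_values : Prop := ∀ (all_time_values : List Int) (hidden_graph_values : List (List Int)) (number_elements : Int), Dom_historical_values all_time_values hidden_graph_values number_elements → Pre_historical_values all_time_values hidden_graph_values number_elements → Spec_historical_values all_time_values hidden_graph_values number_elements (historical_values all_time_values hidden_graph_values number_elements)

-- ===== LEMMAS AND PROOFS =====

-- Stepping the modulus: (s+1) % ne in terms of s % ne.
lemma hv_emod_succ (s ne : Int) : (s + 1) % ne = (s % ne + 1) % ne := by
  have hd : s + 1 = (s % ne + 1) + ne * (s / ne) := by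
    have h2 := Int.emod_add_mul_ediv s ne; linarith
  rw [hd, Int.add_mul_emod_self_left]

-- Appending [v] to bucket t is, bucketwise, consing v in front of whatever is appended later.
lemma hv_map_enum_modify (hgv : List (List Int)) (t : Nat) (v : Int) (g : Int → List Int) (s0 : Int) :
    (PySem.List.enumerate (hgv.modify t (fun b => b ++ [v])) s0).map (fun jb => jb.2 ++ g jb.1)
      = (PySem.List.enumerate hgv s0).map
          (fun jb => jb.2 ++ (if jb.1 = s0 + (t : Int) then v :: g jb.1 else g jb.1)) := by
  induction hgv generalizing t s0 with
  | nil => simp [PySem.List.enumerate]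
  | cons b rest ih =>
    cases t with
    | zero =>
      simp only [List.modify, List.modifyTailIdx_zero, List.modifyHead_cons,
        PySem.List.enumerate_cons, List.map_cons, Nat.cast_zero, add_zero]
      refine congrArg₂ _ (by simp) ?_
      refine List.map_congr_left ?_
      intro jb hjb
      rcases (PySem.List.mem_enumerate_iff _ _ _).mp hjb with ⟨k, hk, rfl⟩
      have hne : ¬ ((s0 + 1 + (k : Int)) = s0) := by omega
      simp [hne]
    | succ t' =>
      simp only [List.modify, List.modifyTailIdx_succ_cons, PySem.List.enumerate_cons,
        List.map_cons]
      refine congrArg₂ _ ?_ ?_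
      · have hne : ¬ (s0 = s0 + ((t' + 1 : Nat) : Int)) := by push_cast; omega
        rw [if_neg hne]
      · have hrec := ih t' (s0 + 1)
        simp only [List.modify] at hrec
        rw [hrec]
        refine List.map_congr_left ?_
        intro jb _
        by_cases h : jb.1 = s0 + 1 + (t' : Int)
        · have h2 : jb.1 = s0 + ((t' + 1 : Nat) : Int) := by push_cast; omega
          rw [if_pos h, if_pos h2]
        · have h2 : ¬ jb.1 = s0 + ((t' + 1 : Nat) : Int) := by push_cast; omega
          rw [if_neg h, if_neg h2]

-- Main loop invariant: starting at enumeration index s, with counter whose effective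
-- (post-reset) value is s % ne, A's loop sends the value at index k to bucket k % ne.
lemma hv_loop (ne : Int) (hne : 1 ≤ ne) :
    ∀ (atv : List Int) (s m : Int) (hgv : List (List Int)), 0 ≤ s →
      (if m = ne then 0 else m) = s % ne → 0 ≤ m → m ≤ ne →
      (atv.foldl
        (fun (st : Int × List (List Int)) v =>
          ((if st.1 = ne then 0 else st.1) + 1,
           st.2.modify (if st.1 = ne then 0 else st.1).toNat (fun b => b ++ [v])))
        (m, hgv)).2
        = (PySem.List.enumerate hgv 0).map
            (fun jb => jb.2 ++ (PySem.List.enumerate atv s).filterMap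
              (fun nv => if nv.1 % ne == jb.1 then some nv.2 else none)) := by
  intro atv
  induction atv with
  | nil =>
    intro s m hgv hs hm hm0 hmn
    simp only [List.foldl_nil, PySem.List.enumerate_nil, List.filterMap_nil, List.append_nil]
    exact (PySem.List.map_snd_enumerate hgv 0).symm
  | cons v rest ih =>
    intro s m hgv hs hm hm0 hmn
    simp only [List.foldl_cons]
    set m₁ : Int := if m = ne then 0 else m with hm₁
    have hsmod0 : 0 ≤ s % ne := Int.emod_nonneg s (by omega)
    have hsmodlt : s % ne < ne := Int.emod_lt_of_pos s (by omega)
    have hstep := hv_emod_succ s ne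
    have hnext : (if m₁ + 1 = ne then 0 else m₁ + 1) = (s + 1) % ne := by
      by_cases hc : m₁ + 1 = ne
      · rw [if_pos hc, hstep]
        have hceq : s % ne + 1 = ne := by omega
        rw [hceq, Int.emod_self]
      · rw [if_neg hc, hstep]
        rw [Int.emod_eq_of_lt (by omega) (by omega)]
        omega
    have ihx := ih (s + 1) (m₁ + 1) (hgv.modify m₁.toNat (fun b => b ++ [v]))
      (by omega) hnext (by omega) (by omega)
    rw [ihx]
    rw [hv_map_enum_modify hgv m₁.toNat v
      (fun j => (PySem.List.enumerate rest (s + 1)).filterMap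
        (fun nv => if nv.1 % ne == j then some nv.2 else none)) 0]
    refine List.map_congr_left ?_
    intro jb _
    have hcast : ((m₁.toNat : Int)) = s % ne := by omega
    rw [PySem.List.enumerate_cons]
    by_cases hj : jb.1 = s % ne
    · have hb : (s % ne == jb.1) = true := by simp [hj]
      simp [hcast, hj]
    · have hMax : ¬ (jb.1 = max m₁ 0) := by omega
      have hcond : ¬ (s % ne = jb.1) := by omega
      simp [hMax, hcond]

-- ===== VERDICT (by name: the statement is the Claim_ definition above) =====
theorem historical_values_spec : Claim_equal_historical_values := by
  intro atv hgv ne _ hpre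
  obtain ⟨hne, _⟩ := hpre
  unfold Spec_historical_values historical_values historical_values_alt
  rw [PySem.List.foldl_pyRange_zero_pyGetD' atv 0
    (fun (st : Int × List (List Int)) v =>
      ((if st.1 = ne then 0 else st.1) + 1,
       st.2.modify (if st.1 = ne then 0 else st.1).toNat (fun b => b ++ [v])))
    (0, hgv)]
  rw [hv_loop ne hne atv 0 0 hgv le_rfl (by simp) le_rfl (by omega)]
  refine List.map_congr_left ?_
  intro jb _
  congr 1
  refine List.filterMap_congr ?_
  intro nv _
  simp [PySem.Int.mod_eq_emod_of_pos (show (0:Int) < ne by omega)]
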